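-- pv_equiv track=rewrite | github.com/brighteast99/coding-test-problems | programmers/그래프/방의 개수/solution.py | solution
-- ===== SOURCE A (Python) =====
-- def solution(arrows):
--     DELTA = {
--         0: (0, 1),
--         1: (1, 1),
--         2: (1, 0),
--         3: (1, -1),
--         4: (0, -1),
--         5: (-1, -1),
--         6: (-1, 0),
--         7: (-1, 1),
--     }
--
--     answer = 0
--     cur = (0, 0)
--     nodes, edges = {cur}, set()
--     for arrow in arrows:
--         dx, dy = DELTA[arrow]
--         nxt = (cur[0] + dx, cur[1] + dy)
--
--         if (cur, nxt) not in edges: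
--             if nxt in nodes:
--                 answer += 1
--             if ((cur[0], nxt[1]), (nxt[0], cur[1])) in edges:
--                 answer += 1
--
--         nodes.add(nxt)
--         edges.update({(cur, nxt), (nxt, cur)})
--         cur = nxt
--
--     return answer
-- ===== SOURCE B (Python) =====
-- def solution(arrows):
--     DELTA = [(0, 1), (1, 1), (1, 0), (1, -1), (0, -1), (-1, -1), (-1, 0), (-1, 1)]
--     # stage 1: expand each arrow into two unit steps on a doubled grid,
--     # so crossing diagonals meet at an explicit midpoint node
--     steps = [DELTA[a] for a in arrows for _ in (0, 1)]
--     # stage 2: prefix-sum the steps into the visited path of points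
--     path = [(0, 0)]
--     for dx, dy in steps:
--         x, y = path[-1]
--         path.append((x + dx, y + dy))
--     # stage 3: scan consecutive pairs, counting new edges that close a loop
--     answer = 0
--     seen = {path[0]}
--     edges = set()
--     for p, q in zip(path, path[1:]):
--         e = (min(p, q), max(p, q))
--         if e not in edges and q in seen:
--             answer += 1
--         seen.add(q)
--         edges.add(e)
--     return answer
-- ===== Notes on version B (the rewrite author's own statement) =====
-- stated objective: alternative
-- what changed: B replaces A's single stateful pass with symmetric directed edges and an explicit crossing-corner lookup by three staged passes on a doubled grid: expand arrows into unit half-steps, prefix-sum them into the path, then scan consecutive pairs keeping canonical (min,max) undirected edges, so crossing diagonals are counted at their shared midpoint node; Pre_ only excludes arrow codes outside 0..7, where A raises KeyError.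
import Mathlib
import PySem

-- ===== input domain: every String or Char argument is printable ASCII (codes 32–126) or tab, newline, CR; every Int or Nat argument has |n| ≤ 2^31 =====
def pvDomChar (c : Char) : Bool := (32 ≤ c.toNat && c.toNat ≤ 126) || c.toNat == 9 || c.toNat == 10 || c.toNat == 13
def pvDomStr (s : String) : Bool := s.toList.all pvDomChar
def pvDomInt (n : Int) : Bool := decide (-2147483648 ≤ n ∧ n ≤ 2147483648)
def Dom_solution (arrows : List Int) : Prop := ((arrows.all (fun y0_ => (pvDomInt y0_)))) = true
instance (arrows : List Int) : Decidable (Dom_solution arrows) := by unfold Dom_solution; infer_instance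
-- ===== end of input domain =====

-- B replaces A's single stateful pass (symmetric directed edges + explicit crossing-corner lookup)
-- by three staged passes on a doubled grid: expand arrows into unit half-steps, prefix-sum them
-- into the path, then scan consecutive pairs keeping canonical (min,max) undirected edges
-- (same cost, different decomposition).

-- ===== PORT A =====
def pvDelta : PySem.Dict Int (Int × Int) :=
  PySem.Dict.ofList [(0,(0,1)),(1,(1,1)),(2,(1,0)),(3,(1,-1)),(4,(0,-1)),(5,(-1,-1)),(6,(-1,0)),(7,(-1,1))]

structure StA where
  answer : Int
  cur : Int × Int
  nodes : PySem.Set (Int × Int)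
  edges : PySem.Set ((Int × Int) × (Int × Int))

-- body of A's loop once the DELTA lookup has succeeded
def stepA (st : StA) (d : Int × Int) : StA :=
  let cur := st.cur
  let nxt : Int × Int := (cur.1 + d.1, cur.2 + d.2)
  let answer :=
    if (cur, nxt) ∈ st.edges then st.answer
    else
      let a1 := if nxt ∈ st.nodes then st.answer + 1 else st.answer
      if ((cur.1, nxt.2), (nxt.1, cur.2)) ∈ st.edges then a1 + 1 else a1
  { answer := answer,
    cur := nxt,
    nodes := PySem.Set.add st.nodes nxt,
    edges := PySem.Set.update st.edges [(cur, nxt), (nxt, cur)] }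

-- one iteration of A's 'for arrow in arrows' loop (Option-threaded: none = a raised KeyError)
def loopA (o : Option StA) (arrow : Int) : Option StA :=
  o.bind (fun st =>
    match (pvDelta.get? arrow) with     -- DELTA[arrow]; none = KeyError
    | none => none
    | some d => some (stepA st d))

def solution (arrows : List Int) : Int :=
  let init : StA := { answer := 0, cur := (0,0), nodes := PySem.Set.ofList [((0:Int),(0:Int))], edges := PySem.Set.empty }
  let res := arrows.foldl loopA (some init)
  match res with
  | some st => st.answer
  | none => 0          -- unreachable under Pre_solution

-- ===== PORT B =====
def deltaListB : List (Int × Int) := [(0,1),(1,1),(1,0),(1,-1),(0,-1),(-1,-1),(-1,0),(-1,1)]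

-- Python's lexicographic '<' on pairs of ints
def lexLtB (p q : Int × Int) : Bool := p.1 < q.1 || (p.1 == q.1 && p.2 < q.2)

-- (min(p, q), max(p, q)) with Python's tuple comparison
def canon (p q : Int × Int) : (Int × Int) × (Int × Int) := if lexLtB q p then (q, p) else (p, q)

-- one unit step of stage 2's prefix sum
def moveB (p d : Int × Int) : Int × Int := (p.1 + d.1, p.2 + d.2)

structure StB where
  answer : Int
  seen : PySem.Set (Int × Int)
  edges : PySem.Set ((Int × Int) × (Int × Int))

-- body of stage 3's loop over one consecutive pair (p, q) of the path
def stepPair (st : StB) (pq : (Int × Int) × (Int × Int)) : StB :=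
  let e := canon pq.1 pq.2
  { answer := if e ∉ st.edges ∧ pq.2 ∈ st.seen then st.answer + 1 else st.answer,
    seen := PySem.Set.add st.seen pq.2,
    edges := PySem.Set.add st.edges e }

def solution_alt (arrows : List Int) : Int :=
  match arrows.mapM (fun a => PySem.List.pyGet? deltaListB a) with   -- DELTA[a]; none = IndexError
  | none => 0          -- unreachable under Pre_solution
  | some ds =>
    let steps := ds.flatMap (fun d => [d, d])
    let path := steps.scanl moveB ((0:Int), (0:Int))
    let res := (path.zip path.tail).foldl stepPair
      { answer := 0, seen := PySem.Set.ofList [((0:Int),(0:Int))], edges := PySem.Set.empty }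
    res.answer

-- ===== PRECONDITION & SPEC =====
-- Pre_ excludes exactly the arrow codes outside 0..7, on which Python's A raises KeyError.
def Pre_solution (arrows : List Int) : Prop := ∀ a ∈ arrows, 0 ≤ a ∧ a < 8
instance (arrows : List Int) : Decidable (Pre_solution arrows) := by unfold Pre_solution; infer_instance
def pvWitness_solution : List Int := [0, 2, 4, 6]

def Spec_solution (arrows : List Int) (out : Int) : Prop := out = solution_alt arrows
instance (arrows : List Int) (out : Int) : Decidable (Spec_solution arrows out) := by unfold Spec_solution; infer_instance

-- ===== CLAIM (what is proved, stated in full; the proofs are below) =====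
def Claim_equal_solution : Prop := ∀ (arrows : List Int), Dom_solution arrows → Pre_solution arrows → Spec_solution arrows (solution arrows)

-- ===== LEMMAS AND PROOFS =====

-- one half-step of B, on the combined (current point, state) pair
def halfStep (q : (Int × Int) × StB) (d : Int × Int) : (Int × Int) × StB :=
  (moveB q.1 d, stepPair q.2 (q.1, moveB q.1 d))

-- B's per-arrow action: two half-steps
def arrowStepB (q : (Int × Int) × StB) (d : Int × Int) : (Int × Int) × StB :=
  halfStep (halfStep q d) d

-- structural facts maintained about A's edge set: symmetric, and every edge is a king move
def SideA (a : StA) : Prop :=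
  (∀ p q : Int × Int, (p, q) ∈ a.edges → (q, p) ∈ a.edges) ∧
  (∀ p q : Int × Int, (p, q) ∈ a.edges → (q.1 - p.1, q.2 - p.2) ∈ deltaListB)

-- the simulation invariant: B's (point, state) is A's state drawn on the doubled grid,
-- with every edge of A split into two canonical half-edges meeting at its midpoint node
def InvAB (a : StA) (p : Int × Int) (b : StB) : Prop :=
  b.answer = a.answer ∧
  p = (2 * a.cur.1, 2 * a.cur.2) ∧
  (∀ x : Int × Int, x ∈ b.seen ↔
      ((∃ q ∈ a.nodes, x = (2 * q.1, 2 * q.2)) ∨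
       (∃ e ∈ a.edges, x = (e.1.1 + e.2.1, e.1.2 + e.2.2)))) ∧
  (∀ x y : Int × Int, canon x y ∈ b.edges ↔
      (∃ e ∈ a.edges,
        (x = (2 * e.1.1, 2 * e.1.2) ∧ y = (e.1.1 + e.2.1, e.1.2 + e.2.2)) ∨
        (x = (e.1.1 + e.2.1, e.1.2 + e.2.2) ∧ y = (2 * e.1.1, 2 * e.1.2))))

lemma delta_mem_iff (d : Int × Int) :
    d ∈ deltaListB ↔ d = (0,1) ∨ d = (1,1) ∨ d = (1,0) ∨ d = (1,-1) ∨ d = (0,-1) ∨ d = (-1,-1) ∨ d = (-1,0) ∨ d = (-1,1) := by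
  simp [deltaListB]

lemma delta_not_even {d : Int × Int} (hd : d ∈ deltaListB) : ¬ (2 ∣ d.1 ∧ 2 ∣ d.2) := by
  rw [delta_mem_iff] at hd
  rcases hd with h | h | h | h | h | h | h | h <;> subst h <;> decide

lemma neg_delta_mem {d : Int × Int} (hd : d ∈ deltaListB) : (-d.1, -d.2) ∈ deltaListB := by
  rw [delta_mem_iff] at hd ⊢
  rcases hd with h | h | h | h | h | h | h | h <;> subst h <;> simp

-- the key property of the canonical form: equal canonical pairs are the same unordered pair
lemma canon_eq_iff {x y c n : Int × Int} (h : c ≠ n) :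
    canon x y = canon c n ↔ (x = c ∧ y = n) ∨ (x = n ∧ y = c) := by
  obtain ⟨x1, x2⟩ := x; obtain ⟨y1, y2⟩ := y; obtain ⟨c1, c2⟩ := c; obtain ⟨n1, n2⟩ := n
  simp only [Ne, Prod.mk.injEq] at h
  unfold canon lexLtB
  split_ifs with h1 h2 h2 <;>
    (simp only [Bool.or_eq_true, Bool.and_eq_true, decide_eq_true_eq, beq_iff_eq] at h1 h2
     simp only [Prod.mk.injEq]
     omega)

-- an edge whose endpoints sum to 2p+d (a midpoint) is (p, p+d), its reverse, the crossing corner, or its reverse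
lemma four_cases {d s : Int × Int} (hd : d ∈ deltaListB) (hs : s ∈ deltaListB)
    (p u v : Int × Int)
    (h1 : u.1 + v.1 = 2 * p.1 + d.1) (h2 : u.2 + v.2 = 2 * p.2 + d.2)
    (h3 : v.1 - u.1 = s.1) (h4 : v.2 - u.2 = s.2) :
    (u = p ∧ v = (p.1 + d.1, p.2 + d.2)) ∨
    (u = (p.1 + d.1, p.2 + d.2) ∧ v = p) ∨
    (u = (p.1, p.2 + d.2) ∧ v = (p.1 + d.1, p.2)) ∨
    (u = (p.1 + d.1, p.2) ∧ v = (p.1, p.2 + d.2)) := by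
  obtain ⟨u1, u2⟩ := u
  obtain ⟨v1, v2⟩ := v
  rw [delta_mem_iff] at hd hs
  simp only [Prod.ext_iff] at hd hs ⊢
  rcases hd with h | h | h | h | h | h | h | h <;>
    rcases hs with h' | h' | h' | h' | h' | h' | h' | h' <;>
      (obtain ⟨ha, hb⟩ := h; obtain ⟨hc, he⟩ := h'; simp only [ha, hb, hc, he] at h1 h2 h3 h4; omega)

lemma get?_pvDelta_mem {arrow : Int} {v : Int × Int} (h : pvDelta.get? arrow = some v) :
    v ∈ deltaListB := by
  have hmem := PySem.Dict.mem_items_of_get?_eq_some (d := pvDelta) h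
  have hitems : pvDelta.items = [(0,((0:Int),(1:Int))),(1,(1,1)),(2,(1,0)),(3,(1,-1)),(4,(0,-1)),(5,(-1,-1)),(6,(-1,0)),(7,(-1,1))] := by decide
  rw [hitems] at hmem
  rw [delta_mem_iff]
  simp only [List.mem_cons, List.not_mem_nil, or_false, Prod.mk.injEq] at hmem
  rcases hmem with ⟨_, h⟩ | ⟨_, h⟩ | ⟨_, h⟩ | ⟨_, h⟩ | ⟨_, h⟩ | ⟨_, h⟩ | ⟨_, h⟩ | ⟨_, h⟩ <;> simp [h]

-- the two DELTA lookups agree on 0..7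
lemma look_agree {x : Int} (h0 : 0 ≤ x) (h8 : x < 8) :
    PySem.List.pyGet? deltaListB x = pvDelta.get? x := by
  interval_cases x <;> decide

lemma look_some {x : Int} (h0 : 0 ≤ x) (h8 : x < 8) : (pvDelta.get? x).isSome := by
  interval_cases x <;> decide

lemma step_preserves {d : Int × Int} (hd : d ∈ deltaListB) (a : StA) (p : Int × Int) (b : StB)
    (hI : InvAB a p b) (hS : SideA a) :
    InvAB (stepA a d) (arrowStepB (p, b) d).1 (arrowStepB (p, b) d).2 ∧ SideA (stepA a d) := by
  obtain ⟨hans, hcur, hnodes, hedges⟩ := hI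
  obtain ⟨hsym, hking⟩ := hS
  have hdodd : ¬ (2 ∣ d.1 ∧ 2 ∣ d.2) := delta_not_even hd
  have hd0 : ¬ (d.1 = 0 ∧ d.2 = 0) := by
    rintro ⟨h1, h2⟩; exact hdodd ⟨⟨0, by omega⟩, ⟨0, by omega⟩⟩
  subst hcur
  -- abbreviations in the prose: c = a.cur, n = c + d, m = 2c + d (midpoint), n2 = 2c + 2d
  have ne_cm : ((2 * a.cur.1, 2 * a.cur.2) : Int × Int) ≠ (2 * a.cur.1 + d.1, 2 * a.cur.2 + d.2) := by
    simp only [Ne, Prod.mk.injEq]; intro h; exact hd0 ⟨by omega, by omega⟩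
  have ne_mn : ((2 * a.cur.1 + d.1, 2 * a.cur.2 + d.2) : Int × Int) ≠ (2 * a.cur.1 + d.1 + d.1, 2 * a.cur.2 + d.2 + d.2) := by
    simp only [Ne, Prod.mk.injEq]; intro h; exact hd0 ⟨by omega, by omega⟩
  -- half-edge 1: canon(2c, m) ∈ b.edges ↔ (c, n) ∈ a.edges
  have hEB1 : (canon (2 * a.cur.1, 2 * a.cur.2) (2 * a.cur.1 + d.1, 2 * a.cur.2 + d.2) ∈ b.edges)
      ↔ (a.cur, (a.cur.1 + d.1, a.cur.2 + d.2)) ∈ a.edges := by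
    rw [hedges]
    constructor
    · rintro ⟨e, he, ⟨hx, hy⟩ | ⟨hx, hy⟩⟩
      · have hee : e = (a.cur, (a.cur.1 + d.1, a.cur.2 + d.2)) := by
          obtain ⟨⟨e11, e12⟩, ⟨e21, e22⟩⟩ := e
          simp only [Prod.ext_iff] at hx hy ⊢
          omega
        rwa [hee] at he
      · exfalso
        simp only [Prod.mk.injEq] at hx hy
        exact hdodd ⟨⟨e.1.1 - a.cur.1, by omega⟩, ⟨e.1.2 - a.cur.2, by omega⟩⟩
    · intro h
      exact ⟨(a.cur, (a.cur.1 + d.1, a.cur.2 + d.2)), h, Or.inl ⟨rfl, by simp [Prod.mk.injEq]; omega⟩⟩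
  -- half-edge 2: canon(m, n2) ∈ b.edges ↔ (c, n) ∈ a.edges
  have hEB2 : (canon (2 * a.cur.1 + d.1, 2 * a.cur.2 + d.2) (2 * a.cur.1 + d.1 + d.1, 2 * a.cur.2 + d.2 + d.2) ∈ b.edges)
      ↔ (a.cur, (a.cur.1 + d.1, a.cur.2 + d.2)) ∈ a.edges := by
    rw [hedges]
    constructor
    · rintro ⟨e, he, ⟨hx, hy⟩ | ⟨hx, hy⟩⟩
      · exfalso
        simp only [Prod.mk.injEq] at hx
        exact hdodd ⟨⟨e.1.1 - a.cur.1, by omega⟩, ⟨e.1.2 - a.cur.2, by omega⟩⟩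
      · have hee : e = ((a.cur.1 + d.1, a.cur.2 + d.2), a.cur) := by
          obtain ⟨⟨e11, e12⟩, ⟨e21, e22⟩⟩ := e
          simp only [Prod.ext_iff] at hx hy ⊢
          omega
        rw [hee] at he
        have := hsym _ _ he
        simpa using this
    · intro h
      refine ⟨((a.cur.1 + d.1, a.cur.2 + d.2), a.cur), hsym _ _ h, Or.inr ⟨by simp [Prod.mk.injEq]; omega, by simp only [Prod.mk.injEq]; omega⟩⟩
  -- midpoint membership: m ∈ b.seen ↔ (c,n) ∈ edges ∨ corner ∈ edges
  have hMB : ((2 * a.cur.1 + d.1, 2 * a.cur.2 + d.2) ∈ b.seen)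
      ↔ ((a.cur, (a.cur.1 + d.1, a.cur.2 + d.2)) ∈ a.edges ∨
         ((a.cur.1, a.cur.2 + d.2), (a.cur.1 + d.1, a.cur.2)) ∈ a.edges) := by
    rw [hnodes]
    constructor
    · rintro (⟨q, hq, hx⟩ | ⟨e, he, hx⟩)
      · exfalso
        simp only [Prod.mk.injEq] at hx
        exact hdodd ⟨⟨q.1 - a.cur.1, by omega⟩, ⟨q.2 - a.cur.2, by omega⟩⟩
      · have hee : ((e.1 : Int × Int), e.2) ∈ a.edges := by rwa [Prod.mk.eta]
        have hks := hking e.1 e.2 hee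
        simp only [Prod.mk.injEq] at hx
        have h4 := four_cases hd hks a.cur e.1 e.2 (by omega) (by omega) rfl rfl
        rcases h4 with ⟨h1, h2⟩ | ⟨h1, h2⟩ | ⟨h1, h2⟩ | ⟨h1, h2⟩
        · left; rwa [h1, h2] at hee
        · left; have := hsym _ _ hee; rwa [h1, h2] at this
        · right; rwa [h1, h2] at hee
        · right; have := hsym _ _ hee; rwa [h1, h2] at this
    · rintro (h | h)
      · exact Or.inr ⟨_, h, by simp [Prod.mk.injEq]; omega⟩
      · exact Or.inr ⟨_, h, by simp [Prod.mk.injEq]; omega⟩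
  -- doubled endpoint: n2 ∈ b.seen ↔ n ∈ a.nodes
  have hNB : ((2 * a.cur.1 + d.1 + d.1, 2 * a.cur.2 + d.2 + d.2) ∈ b.seen)
      ↔ (a.cur.1 + d.1, a.cur.2 + d.2) ∈ a.nodes := by
    rw [hnodes]
    constructor
    · rintro (⟨q, hq, hx⟩ | ⟨e, he, hx⟩)
      · have hq' : q = (a.cur.1 + d.1, a.cur.2 + d.2) := by
          obtain ⟨q1, q2⟩ := q
          simp only [Prod.mk.injEq] at hx ⊢
          omega
        rwa [hq'] at hq
      · exfalso
        have hee : ((e.1 : Int × Int), e.2) ∈ a.edges := by rwa [Prod.mk.eta]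
        have hks := hking e.1 e.2 hee
        simp only [Prod.mk.injEq] at hx
        have := delta_not_even hks
        simp only at this
        omega
    · intro h
      exact Or.inl ⟨_, h, by simp [Prod.mk.injEq]; omega⟩
  have ne3 : ((2 * a.cur.1 + d.1 + d.1, 2 * a.cur.2 + d.2 + d.2) : Int × Int)
      ≠ (2 * a.cur.1 + d.1, 2 * a.cur.2 + d.2) := by
    simp only [Ne, Prod.mk.injEq]
    intro h; exact hd0 ⟨by omega, by omega⟩
  -- the second half-step's edge test: canon m n2 ≠ canon 2c m
  have hcne : canon (2 * a.cur.1 + d.1, 2 * a.cur.2 + d.2) (2 * a.cur.1 + d.1 + d.1, 2 * a.cur.2 + d.2 + d.2)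
      ≠ canon (2 * a.cur.1, 2 * a.cur.2) (2 * a.cur.1 + d.1, 2 * a.cur.2 + d.2) := by
    rw [Ne, canon_eq_iff ne_cm]
    rintro (⟨h1, h2⟩ | ⟨h1, h2⟩) <;> (simp only [Prod.mk.injEq] at h1 h2; exact hd0 ⟨by omega, by omega⟩)
  refine ⟨⟨?_, ?_, ?_, ?_⟩, ?_, ?_⟩
  · -- answers agree
    simp only [arrowStepB, halfStep, stepPair, stepA, moveB]
    simp only [PySem.Set.mem_add]
    simp only [hEB1, hEB2, hMB, hNB, hans]
    simp only [hcne, ne3, or_false]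
    by_cases hE : (a.cur, (a.cur.1 + d.1, a.cur.2 + d.2)) ∈ a.edges <;>
      by_cases hC : ((a.cur.1, a.cur.2 + d.2), (a.cur.1 + d.1, a.cur.2)) ∈ a.edges <;>
        by_cases hN : (a.cur.1 + d.1, a.cur.2 + d.2) ∈ a.nodes <;>
          simp [hE, hC, hN]
  · -- cur
    simp only [arrowStepB, halfStep, stepA, moveB, Prod.mk.injEq]
    constructor <;> omega
  · -- seen characterization
    intro x
    simp only [arrowStepB, halfStep, stepPair, stepA, moveB, PySem.Set.mem_add,
      PySem.Set.mem_update, List.mem_cons, List.not_mem_nil, or_false]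
    rw [hnodes]
    constructor
    · rintro (((⟨q, hq, hx⟩ | ⟨e, he, hx⟩) | h) | h)
      · exact Or.inl ⟨q, Or.inl hq, hx⟩
      · exact Or.inr ⟨e, Or.inl he, hx⟩
      · subst h
        refine Or.inr ⟨(a.cur, (a.cur.1 + d.1, a.cur.2 + d.2)), Or.inr (Or.inl rfl), ?_⟩
        simp [Prod.mk.injEq]; omega
      · subst h
        refine Or.inl ⟨(a.cur.1 + d.1, a.cur.2 + d.2), Or.inr rfl, ?_⟩
        simp [Prod.mk.injEq]; omega
    · rintro (⟨q, hq | hq, hx⟩ | ⟨e, he | (he | he), hx⟩)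
      · exact Or.inl (Or.inl (Or.inl ⟨q, hq, hx⟩))
      · subst hq; subst hx
        right
        simp [Prod.mk.injEq]; omega
      · exact Or.inl (Or.inl (Or.inr ⟨e, he, hx⟩))
      · subst he; subst hx
        left; right
        simp [Prod.mk.injEq]; omega
      · subst he; subst hx
        left; right
        simp [Prod.mk.injEq]; omega
  · -- edges characterization
    intro x y
    simp only [arrowStepB, halfStep, stepPair, stepA, moveB, PySem.Set.mem_add,
      PySem.Set.mem_update, List.mem_cons, List.not_mem_nil, or_false]
    rw [canon_eq_iff ne_mn, canon_eq_iff ne_cm, hedges]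
    constructor
    · rintro ((⟨e, he, hc⟩ | (⟨hx, hy⟩ | ⟨hx, hy⟩)) | (⟨hx, hy⟩ | ⟨hx, hy⟩))
      · exact ⟨e, Or.inl he, hc⟩
      · subst hx; subst hy
        refine ⟨(a.cur, (a.cur.1 + d.1, a.cur.2 + d.2)), Or.inr (Or.inl rfl), ?_⟩
        simp [Prod.mk.injEq]; omega
      · subst hx; subst hy
        refine ⟨(a.cur, (a.cur.1 + d.1, a.cur.2 + d.2)), Or.inr (Or.inl rfl), ?_⟩
        simp [Prod.mk.injEq]; omega
      · subst hx; subst hy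
        refine ⟨((a.cur.1 + d.1, a.cur.2 + d.2), a.cur), Or.inr (Or.inr rfl), ?_⟩
        simp [Prod.mk.injEq]; omega
      · subst hx; subst hy
        refine ⟨((a.cur.1 + d.1, a.cur.2 + d.2), a.cur), Or.inr (Or.inr rfl), ?_⟩
        simp [Prod.mk.injEq]; omega
    · rintro ⟨e, he | (he | he), hc⟩
      · exact Or.inl (Or.inl ⟨e, he, hc⟩)
      · subst he
        rcases hc with ⟨hx, hy⟩ | ⟨hx, hy⟩
        · subst hx; subst hy
          left; right; left
          simp [Prod.mk.injEq]; omega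
        · subst hx; subst hy
          left; right; right
          simp [Prod.mk.injEq]; omega
      · subst he
        rcases hc with ⟨hx, hy⟩ | ⟨hx, hy⟩
        · subst hx; subst hy
          right; right
          simp [Prod.mk.injEq]; omega
        · subst hx; subst hy
          right; left
          simp [Prod.mk.injEq]; omega
  · -- symmetry preserved
    intro u v h
    simp only [stepA, PySem.Set.mem_update, List.mem_cons, List.not_mem_nil, or_false] at h ⊢
    rcases h with h | (h | h)
    · exact Or.inl (hsym _ _ h)
    · injection h with h1 h2
      subst h1; subst h2
      exact Or.inr (Or.inr rfl)
    · injection h with h1 h2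
      subst h1; subst h2
      exact Or.inr (Or.inl rfl)
  · -- king moves preserved
    intro u v h
    simp only [stepA, PySem.Set.mem_update, List.mem_cons, List.not_mem_nil, or_false] at h
    rcases h with h | (h | h)
    · exact hking _ _ h
    · injection h with h1 h2
      subst h1; subst h2
      have hh : (((a.cur.1 + d.1, a.cur.2 + d.2) : Int × Int).1 - a.cur.1, ((a.cur.1 + d.1, a.cur.2 + d.2) : Int × Int).2 - a.cur.2) = d := by
        simp
      rw [hh]
      exact hd
    · injection h with h1 h2
      subst h1; subst h2
      have hh : ((a.cur.1 - ((a.cur.1 + d.1, a.cur.2 + d.2) : Int × Int).1, a.cur.2 - ((a.cur.1 + d.1, a.cur.2 + d.2) : Int × Int).2) : Int × Int) = (-d.1, -d.2) := by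
        simp
      rw [hh]
      exact neg_delta_mem hd

-- stage 2 + stage 3 of B collapse into a single fold of half-steps over the step list
lemma zip_scanl_foldl (t : List (Int × Int)) :
    ∀ (c : Int × Int) (st : StB),
      (((t.scanl moveB c).zip (t.scanl moveB c).tail).foldl stepPair st)
        = (t.foldl halfStep (c, st)).2 := by
  induction t with
  | nil => intro c st; simp [List.scanl]
  | cons d t ih =>
    intro c st
    have h2 : List.scanl moveB (moveB c d) t = (moveB c d) :: (List.scanl moveB (moveB c d) t).tail := by
      cases t <;> simp [List.scanl]
    rw [List.scanl_cons, List.tail_cons]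
    conv_lhs => rw [h2, List.zip_cons_cons, ← h2]
    rw [List.foldl_cons]
    rw [ih (moveB c d) (stepPair st (c, moveB c d))]
    simp [halfStep]

-- stage 1's duplication turns the half-step fold into the per-arrow double step
lemma flatMap_two_fold (ds : List (Int × Int)) :
    ∀ (q : (Int × Int) × StB),
      (ds.flatMap (fun d => [d, d])).foldl halfStep q = ds.foldl arrowStepB q := by
  induction ds with
  | nil => intro q; simp
  | cons d t ih =>
    intro q
    simp only [List.flatMap_cons, List.foldl_append, List.foldl_cons]
    rw [ih]
    rfl

-- the main simulation: under Pre_, A's fold succeeds, B's lookups succeed, and the invariant is kept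
lemma fold_rel (arrows : List Int) (h : ∀ a ∈ arrows, 0 ≤ a ∧ a < 8) :
    ∀ (a : StA) (p : Int × Int) (b : StB), InvAB a p b → SideA a →
    ∃ ds, arrows.mapM (fun x => PySem.List.pyGet? deltaListB x) = some ds ∧
      ∃ a', arrows.foldl loopA (some a) = some a' ∧
        InvAB a' (ds.foldl arrowStepB (p, b)).1 (ds.foldl arrowStepB (p, b)).2 ∧ SideA a' := by
  induction arrows with
  | nil =>
    intro a p b hI hS
    exact ⟨[], rfl, a, rfl, hI, hS⟩
  | cons x t ih =>
    intro a p b hI hS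
    obtain ⟨hx0, hx8⟩ := h x (by simp)
    have hagree := look_agree hx0 hx8
    have hsome := look_some hx0 hx8
    cases hget : pvDelta.get? x with
    | none => rw [hget] at hsome; simp at hsome
    | some d =>
      have hdm := get?_pvDelta_mem hget
      obtain ⟨hI', hS'⟩ := step_preserves hdm a p b hI hS
      obtain ⟨ds, hds, a', ha', hI'', hS''⟩ :=
        ih (fun y hy => h y (List.mem_cons_of_mem _ hy)) (stepA a d)
          (arrowStepB (p, b) d).1 (arrowStepB (p, b) d).2 hI' hS'
      refine ⟨d :: ds, ?_, a', ?_, ?_, hS''⟩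
      · simp [List.mapM_cons, hagree, hget, hds]
      · simpa [loopA, hget] using ha'
      · simpa using hI''

-- ===== VERDICT (by name: the statement is the Claim_ definition above) =====
theorem solution_spec : Claim_equal_solution := by
  intro arrows _ hpre
  unfold Spec_solution solution solution_alt
  obtain ⟨ds, hds, a', ha', hI', hS'⟩ := fold_rel arrows hpre
    { answer := 0, cur := (0,0), nodes := PySem.Set.ofList [((0:Int),(0:Int))], edges := PySem.Set.empty }
    ((0:Int), (0:Int))
    { answer := 0, seen := PySem.Set.ofList [((0:Int),(0:Int))], edges := PySem.Set.empty }
    (by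
      refine ⟨rfl, by simp, ?_, ?_⟩
      · intro x
        simp [PySem.Set.mem_ofList, PySem.Set.empty, Prod.ext_iff]
      · intro x y
        simp [PySem.Set.empty])
    (by
      refine ⟨?_, ?_⟩
      · intro u v hm
        simp [PySem.Set.empty] at hm
      · intro u v hm
        simp [PySem.Set.empty] at hm)
  rw [hds]
  dsimp only
  rw [zip_scanl_foldl, flatMap_two_fold]
  rw [ha']
  exact hI'.1.symm
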